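-- pv_equiv track=rewrite | github.com/vrthra/pygram | miner.py | filter_redundant
-- ===== SOURCE A (Python) =====
-- def get_updated_value(to_remove, v):
--     for k,vs in to_remove.items():
--         if v in vs:
--             return k
--     return v
--
-- def filter_redundant(grammar):
--     kv = [(k,v) for k,v in grammar.items()]
--     ks = [k for k,v in kv]
--     vs = [v for k,v in kv]
--     to_remove = {}
--     for k in grammar.keys():
--         ids = [i for i,x in enumerate(vs) if k in x]
--         if ids:
--             to_remove[k] = [ks[j] for j in ids if ks[j] != '$START']
--
--     new_grammar = {}
--     for k,vs in grammar.items():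
--         alt = set()
--         for v in vs:
--             val = get_updated_value(to_remove, v)
--             alt.add(val)
--         new_grammar[k] = alt
--     return new_grammar
-- ===== SOURCE B (Python) =====
-- def filter_redundant(grammar):
--     def repl(v):
--         if v in grammar and v != '$START':
--             gv = grammar[v]
--             for K in grammar:
--                 if K in gv:
--                     return K
--         return v
--     return {k: {repl(v) for v in vs} for k, vs in grammar.items()}
-- ===== Notes on version B (the rewrite author's own statement) =====
-- stated objective: simpler
-- what changed: B drops A's precomputed to_remove reverse index entirely and computes each value's replacement directly: if v is a non-$START grammar key, scan grammar keys in insertion order for the first K contained in grammar[v], else keep v. Pre_ excludes association lists with duplicate keys, which do not denote any Python dict input.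
import Mathlib
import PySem

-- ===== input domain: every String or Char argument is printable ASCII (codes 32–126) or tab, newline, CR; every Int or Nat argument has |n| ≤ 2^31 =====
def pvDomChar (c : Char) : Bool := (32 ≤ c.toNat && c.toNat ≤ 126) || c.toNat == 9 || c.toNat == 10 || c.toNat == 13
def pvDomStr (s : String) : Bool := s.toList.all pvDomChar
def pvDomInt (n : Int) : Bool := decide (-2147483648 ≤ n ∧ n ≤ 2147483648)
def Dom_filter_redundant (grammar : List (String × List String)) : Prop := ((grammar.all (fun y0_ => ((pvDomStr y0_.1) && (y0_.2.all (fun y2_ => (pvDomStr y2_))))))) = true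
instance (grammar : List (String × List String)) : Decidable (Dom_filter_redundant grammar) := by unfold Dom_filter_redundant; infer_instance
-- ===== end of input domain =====

-- B drops A's precomputed to_remove reverse index and computes each value's replacement
-- by a direct ordered scan of the grammar (simpler; same asymptotic cost).

-- ===== PORT A =====
def guvGo : List (String × List String) → String → String
  | [], v => v
  | (k, vs) :: rest, v => if v ∈ vs then k else guvGo rest v

def get_updated_value (to_remove : PySem.Dict String (List String)) (v : String) : String :=
  guvGo to_remove.items v

def idsOf (vs : List (List String)) (k : String) : List Int :=
  ((PySem.List.enumerate vs).filter (fun ix => decide (k ∈ ix.2))).map (·.1)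

def valOf (ks : List String) (ids : List Int) : List String :=
  ids.filterMap (fun j =>
    let x := PySem.List.pyGetD ks j ""
    if x ≠ "$START" then some x else none)

def filter_redundant (grammar : List (String × List String)) : List (String × List String) :=
  let kv := grammar
  let ks := kv.map (·.1)
  let vs := kv.map (·.2)
  let to_remove : PySem.Dict String (List String) := grammar.foldl (fun tr p =>
      let ids := idsOf vs p.1
      if ids ≠ [] then tr.insert p.1 (valOf ks ids) else tr) PySem.Dict.empty
  let new_grammar : PySem.Dict String (List String) := grammar.foldl (fun ng p =>
      let alt := p.2.foldl (fun s v => PySem.Set.add s (get_updated_value to_remove v)) PySem.Set.empty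
      ng.insert p.1 alt) PySem.Dict.empty
  new_grammar.items

-- ===== PORT B =====
def repl_alt (g : List (String × List String)) (v : String) : String :=
  if (g.any (fun p => p.1 == v)) && (v != "$START") then
    let gv := (PySem.Dict.mk g).getD v []
    match g.find? (fun p => decide (p.1 ∈ gv)) with
    | some p => p.1
    | none => v
  else v

def filter_redundant_alt (g : List (String × List String)) : List (String × List String) :=
  g.map (fun p => (p.1, p.2.foldl (fun s v => PySem.Set.add s (repl_alt g v)) PySem.Set.empty))

-- ===== PRECONDITION & SPEC =====
-- Pre_ excludes association lists with duplicate keys: such a list does not denote the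
-- Python dict A receives (a dict collapses duplicate keys), so list-level behaviour there
-- is a representation accident, not A's behaviour.
def Pre_filter_redundant (grammar : List (String × List String)) : Prop :=
  (grammar.map (·.1)).Nodup
instance (grammar : List (String × List String)) : Decidable (Pre_filter_redundant grammar) := by
  unfold Pre_filter_redundant; infer_instance

def pvWitness_filter_redundant : (List (String × List String)) :=
  [("$START", ["a"]), ("a", ["b", "a"]), ("b", ["a"])]

def Spec_filter_redundant (grammar : List (String × List String)) (out : List (String × List String)) : Prop := out = filter_redundant_alt grammar
instance (grammar : List (String × List String)) (out : List (String × List String)) : Decidable (Spec_filter_redundant grammar out) := by unfold Spec_filter_redundant; infer_instance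

-- ===== CLAIM (what is proved, stated in full; the proofs are below) =====
def Claim_equal_filter_redundant : Prop := ∀ (grammar : List (String × List String)), Dom_filter_redundant grammar → Pre_filter_redundant grammar → Spec_filter_redundant grammar (filter_redundant grammar)

-- ===== LEMMAS AND PROOFS =====


lemma valOf_idsOf (k : String) (pre rest : List (String × List String)) :
    valOf ((pre ++ rest).map (·.1))
      (((PySem.List.enumerate (rest.map (·.2)) (pre.length : Int)).filter
          (fun ix => decide (k ∈ ix.2))).map (·.1))
    = ((rest.filter (fun q => decide (k ∈ q.2))).map (·.1)).filter (fun x => x ≠ "$START") := by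
  induction rest generalizing pre with
  | nil => simp [valOf]
  | cons q rest ih =>
    have hget : PySem.List.pyGetD ((pre ++ q :: rest).map (·.1)) (pre.length : Int) "" = q.1 := by
      rw [PySem.List.pyGetD_natCast]
      simp [List.getD, List.getElem?_append_right (by simp : pre.length ≤ ((pre).map (·.1)).length |>.trans (le_of_eq rfl))]
    have hstep : (pre ++ [q]) ++ rest = pre ++ q :: rest := by simp
    have hlen : ((pre ++ [q]).length : Int) = (pre.length : Int) + 1 := by simp
    simp only [List.map_cons, PySem.List.enumerate_cons, List.filter_cons]
    by_cases hk : k ∈ q.2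
    · simp only [hk, decide_true, if_true, List.map_cons]
      simp only [valOf, List.filterMap_cons]
      rw [hget]
      have := ih (pre ++ [q])
      rw [hstep, hlen] at this
      simp only [valOf] at this
      by_cases hs : q.1 = "$START"
      · simp [hs] at this ⊢
        convert this using 2
      · simp [hs] at this ⊢
        convert this using 2
    · simp only [hk, decide_false]
      have := ih (pre ++ [q])
      rw [hstep, hlen] at this
      simpa [hk] using this

lemma items_to_remove (ks : List String) (vs : List (List String))
    (l : List (String × List String)) (d : PySem.Dict String (List String))
    (hnd : (l.map (·.1)).Nodup) (hfresh : ∀ p ∈ l, d.contains p.1 = false) :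
    (l.foldl (fun tr p =>
        let ids := idsOf vs p.1
        if ids ≠ [] then tr.insert p.1 (valOf ks ids) else tr) d).items
    = d.items ++ (l.filter (fun p => decide (idsOf vs p.1 ≠ []))).map
        (fun p => (p.1, valOf ks (idsOf vs p.1))) := by
  induction l generalizing d with
  | nil => simp
  | cons p l ih =>
    simp only [List.map_cons, List.nodup_cons] at hnd
    simp only [List.foldl_cons, List.filter_cons]
    by_cases hc : idsOf vs p.1 ≠ []
    · rw [if_pos hc, if_pos (show decide (idsOf vs p.1 ≠ []) = true by simpa using hc), List.map_cons]
      rw [ih _ hnd.2 ?_]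
      · rw [PySem.Dict.items_insert, hfresh p (by simp)]
        simp
      · intro q hq
        rw [PySem.Dict.contains_insert]
        have : (q.1 == p.1) = false := by
          simp only [beq_eq_false_iff_ne]
          intro h; exact hnd.1 (h ▸ List.mem_map_of_mem hq)
        simp [this, hfresh q (List.mem_cons_of_mem _ hq)]
    · rw [if_neg hc, if_neg (show ¬ decide (idsOf vs p.1 ≠ []) = true by simpa using hc)]
      exact ih _ hnd.2 (fun q hq => hfresh q (List.mem_cons_of_mem _ hq))

-- membership in the value list A stores for key k
lemma mem_valList (g : List (String × List String)) (k v : String) :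
    v ∈ valOf (g.map (·.1)) (idsOf (g.map (·.2)) k)
      ↔ (∃ q ∈ g, k ∈ q.2 ∧ q.1 = v) ∧ v ≠ "$START" := by
  have h := valOf_idsOf k [] g
  simp only [List.nil_append, List.length_nil, Nat.cast_zero] at h
  rw [idsOf, h]
  simp only [List.mem_filter, List.mem_map, List.mem_filter, decide_eq_true_eq]
  constructor
  · rintro ⟨⟨q, ⟨hq, hkq⟩, rfl⟩, hS⟩
    exact ⟨⟨q, hq, hkq, rfl⟩, by simpa using hS⟩
  · rintro ⟨⟨q, hq, hkq, rfl⟩, hS⟩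
    exact ⟨⟨q, ⟨hq, hkq⟩, rfl⟩, by simpa using hS⟩

lemma guvGo_of_not_mem (tr : List (String × List String)) (v : String)
    (h : ∀ e ∈ tr, v ∉ e.2) : guvGo tr v = v := by
  induction tr with
  | nil => rfl
  | cons e tr ih =>
    obtain ⟨k, vs⟩ := e
    simp only [guvGo]
    rw [if_neg (h (k, vs) (by simp))]
    exact ih (fun e he => h e (List.mem_cons_of_mem _ he))

lemma idsOf_ne_nil_of_mem (g : List (String × List String)) (k : String)
    (q : String × List String) (hq : q ∈ g) (hk : k ∈ q.2) :
    idsOf (g.map (·.2)) k ≠ [] := by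
  simp only [idsOf, ne_eq, List.map_eq_nil_iff, List.filter_eq_nil_iff, not_forall]
  obtain ⟨i, hi, hgi⟩ := List.mem_iff_getElem.mp hq
  refine ⟨((i : Int), q.2), ?_, by simpa using hk⟩
  rw [PySem.List.mem_enumerate_iff]
  exact ⟨i, by simpa using hi, by simp [hgi]⟩

lemma eq_snd_of_nodup (g : List (String × List String))
    (hnd : (g.map (·.1)).Nodup) {q r : String × List String}
    (hq : q ∈ g) (hr : r ∈ g) (h : q.1 = r.1) : q.2 = r.2 := by
  induction g with
  | nil => simp at hq
  | cons p g ih =>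
    simp only [List.map_cons, List.nodup_cons] at hnd
    rcases List.mem_cons.mp hq with rfl | hq'
    · rcases List.mem_cons.mp hr with rfl | hr'
      · rfl
      · exact absurd (h ▸ List.mem_map_of_mem hr') hnd.1
    · rcases List.mem_cons.mp hr with rfl | hr'
      · exact absurd (h ▸ List.mem_map_of_mem hq') hnd.1
      · exact ih hnd.2 hq' hr'

lemma guvGo_scan (gv : List String) (val : String → List String) (c : String → Bool)
    (v : String)
    (hiff : ∀ k, v ∈ val k ↔ k ∈ gv)
    (himp : ∀ k, k ∈ gv → c k = true) :
    ∀ l : List (String × List String),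
    guvGo ((l.filter (fun p => c p.1)).map (fun p => (p.1, val p.1))) v
    = (match l.find? (fun p => decide (p.1 ∈ gv)) with
       | some p => p.1 | none => v) := by
  intro l
  induction l with
  | nil => rfl
  | cons p l ih =>
    rw [List.find?_cons]
    by_cases hmem : p.1 ∈ gv
    · rw [List.filter_cons, if_pos (himp p.1 hmem), List.map_cons, decide_eq_true hmem]
      simp only [guvGo]
      rw [if_pos ((hiff p.1).mpr hmem)]
    · rw [decide_eq_false hmem]
      by_cases hc : c p.1 = true
      · rw [List.filter_cons, if_pos hc, List.map_cons]
        simp only [guvGo]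
        rw [if_neg (fun hv => hmem ((hiff p.1).mp hv))]
        exact ih
      · rw [List.filter_cons, if_neg hc]
        exact ih

-- the crux: A's lookup in to_remove equals B's direct scan
lemma guv_eq_repl (g : List (String × List String))
    (hnd : (g.map (·.1)).Nodup) (v : String) :
    guvGo ((g.filter (fun p => decide (idsOf (g.map (·.2)) p.1 ≠ []))).map
        (fun p => (p.1, valOf (g.map (·.1)) (idsOf (g.map (·.2)) p.1)))) v
    = repl_alt g v := by
  by_cases hkey : (g.any (fun p => p.1 == v)) && (v != "$START")
  · -- v is a non-$START key
    simp only [Bool.and_eq_true, List.any_eq_true, beq_iff_eq, bne_iff_ne, ne_eq] at hkey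
    obtain ⟨⟨pv, hpv, hpv1⟩, hvS⟩ := hkey
    have hkeys : (PySem.Dict.mk g).keys.Nodup := by
      simpa [PySem.Dict.keys] using hnd
    have hgv : (PySem.Dict.mk g).getD v [] = pv.2 :=
      PySem.Dict.getD_of_mem_items (d := PySem.Dict.mk g)
        (show (v, pv.2) ∈ g from hpv1 ▸ hpv) hkeys []
    have hiff : ∀ k, v ∈ valOf (g.map (·.1)) (idsOf (g.map (·.2)) k) ↔ k ∈ pv.2 := by
      intro k
      rw [mem_valList]
      constructor
      · rintro ⟨⟨q, hq, hkq, hq1⟩, -⟩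
        rw [← eq_snd_of_nodup g hnd hq hpv (hq1.trans hpv1.symm)]
        exact hkq
      · intro hk
        exact ⟨⟨pv, hpv, hk, hpv1⟩, hvS⟩
    have himp : ∀ k : String, k ∈ pv.2 → idsOf (g.map (·.2)) k ≠ [] := by
      intro k hk
      exact idsOf_ne_nil_of_mem g k pv hpv hk
    have hb : ((g.any fun p => p.1 == v) && (v != "$START")) = true := by
      simp only [Bool.and_eq_true, List.any_eq_true, beq_iff_eq, bne_iff_ne, ne_eq]
      exact ⟨⟨pv, hpv, hpv1⟩, hvS⟩
    rw [repl_alt, if_pos hb]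
    simp only [hgv]
    exact guvGo_scan pv.2 _ (fun k => decide (idsOf (g.map (·.2)) k ≠ [])) v hiff
      (fun k hk => decide_eq_true (himp k hk)) g
  · -- v is not a key, or v = '$START': every stored list misses v
    rw [repl_alt, if_neg (by simpa using hkey)]
    apply guvGo_of_not_mem
    intro e he
    simp only [List.mem_map, List.mem_filter] at he
    obtain ⟨q, ⟨hq, -⟩, rfl⟩ := he
    intro hv
    rw [mem_valList] at hv
    obtain ⟨⟨r, hr, -, hr1⟩, hvS⟩ := hv
    simp only [Bool.and_eq_true, List.any_eq_true, beq_iff_eq, bne_iff_ne, ne_eq, not_and_or] at hkey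
    rcases hkey with h | h
    · exact h ⟨r, hr, hr1⟩
    · exact hvS (by simpa using h)

theorem filter_redundant_eq_alt (g : List (String × List String)) (hpre : (g.map (·.1)).Nodup) :
    filter_redundant g = filter_redundant_alt g := by
  simp only [filter_redundant]
  have h1 := items_to_remove (g.map (·.1)) (g.map (·.2)) g PySem.Dict.empty hpre
    (fun p _ => PySem.Dict.contains_empty p.1)
  have hempty : (PySem.Dict.empty : PySem.Dict String (List String)).items = [] := rfl
  rw [hempty, List.nil_append] at h1
  have hpt : ∀ v, get_updated_value (g.foldl (fun tr p =>
      let ids := idsOf (g.map (·.2)) p.1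
      if ids ≠ [] then tr.insert p.1 (valOf (g.map (·.1)) ids) else tr) PySem.Dict.empty) v
      = repl_alt g v := by
    intro v
    rw [get_updated_value, h1]
    exact guv_eq_repl g hpre v
  simp only [hpt]
  rw [PySem.Dict.items_foldl_insert_fresh g (fun p => p.1) _ PySem.Dict.empty
    (fun p _ => PySem.Dict.contains_empty p.1) hpre]
  simp [filter_redundant_alt, hempty]

-- ===== VERDICT (by name: the statement is the Claim_ definition above) =====
theorem filter_redundant_spec : Claim_equal_filter_redundant := by
  intro g _hdom hpre
  exact filter_redundant_eq_alt g hpre
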